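-- pv_equiv track=rewrite | github.com/liuxie85/options-monitor | scripts/notify_symbols.py | _group_by_strategy
-- ===== SOURCE A (Python) =====
-- def _group_by_strategy(raw_lines: list[str]) -> dict[str, list[str]]:
--     g = {'sell_put': [], 'sell_call': [], 'other': []}
--     for ln in raw_lines:
--         s = ln
--         if '| sell_put |' in s:
--             g['sell_put'].append(ln)
--         elif '| sell_call |' in s:
--             g['sell_call'].append(ln)
--         else:
--             g['other'].append(ln)
--     return g
-- ===== SOURCE B (Python) =====
-- def _group_by_strategy(raw_lines: list[str]) -> dict[str, list[str]]:
--     return {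
--         'sell_put': [ln for ln in raw_lines if '| sell_put |' in ln],
--         'sell_call': [ln for ln in raw_lines
--                       if '| sell_call |' in ln and '| sell_put |' not in ln],
--         'other': [ln for ln in raw_lines
--                   if '| sell_put |' not in ln and '| sell_call |' not in ln],
--     }
-- ===== Notes on version B (the rewrite author's own statement) =====
-- stated objective: alternative
-- what changed: Replaces the single classifying loop with exclusive branches and dict mutation by three independent filtering passes over raw_lines, one per bucket, assembling the dict literal directly (elif priority preserved by the 'sell_put not in' guard).
import Mathlib
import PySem

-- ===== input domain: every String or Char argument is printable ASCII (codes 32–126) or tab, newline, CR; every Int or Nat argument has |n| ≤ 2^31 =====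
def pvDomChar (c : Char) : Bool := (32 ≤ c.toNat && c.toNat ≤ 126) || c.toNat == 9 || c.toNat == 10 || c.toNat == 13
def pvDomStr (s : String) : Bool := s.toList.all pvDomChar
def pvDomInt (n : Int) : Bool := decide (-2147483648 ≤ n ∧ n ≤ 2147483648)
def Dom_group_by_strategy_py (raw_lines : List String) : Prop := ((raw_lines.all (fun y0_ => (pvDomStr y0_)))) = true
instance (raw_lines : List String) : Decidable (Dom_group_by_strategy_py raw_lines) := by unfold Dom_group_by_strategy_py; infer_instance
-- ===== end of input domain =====

-- B replaces A's single classifying loop over a mutable dict by three independent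
-- filtering passes, one per bucket (alternative decomposition, same cost).

-- ===== PORT A =====
-- A: build the dict {'sell_put': [], 'sell_call': [], 'other': []}, then one loop
-- appending each line to exactly one bucket (elif priority), return the dict's items.
def group_by_strategy_py (raw_lines : List String) : List (String × List String) :=
  let g : PySem.Dict String (List String) :=
    PySem.Dict.ofList [("sell_put", []), ("sell_call", []), ("other", [])]
  let g := raw_lines.foldl (fun g ln =>
    if PySem.Str.isIn "| sell_put |" ln then g.modify "sell_put" [] (· ++ [ln])
    else if PySem.Str.isIn "| sell_call |" ln then g.modify "sell_call" [] (· ++ [ln])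
    else g.modify "other" [] (· ++ [ln])) g
  g.items

-- ===== PORT B =====
-- B: three independent filters, assembled into the dict literal.
def group_by_strategy_py_alt (raw_lines : List String) : List (String × List String) :=
  [ ("sell_put", raw_lines.filter (fun ln => PySem.Str.isIn "| sell_put |" ln)),
    ("sell_call", raw_lines.filter (fun ln =>
        PySem.Str.isIn "| sell_call |" ln && !PySem.Str.isIn "| sell_put |" ln)),
    ("other", raw_lines.filter (fun ln =>
        !PySem.Str.isIn "| sell_put |" ln && !PySem.Str.isIn "| sell_call |" ln)) ]

-- ===== PRECONDITION & SPEC =====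
def Spec_group_by_strategy_py (raw_lines : List String) (out : List (String × List String)) : Prop := out = group_by_strategy_py_alt raw_lines
instance (raw_lines : List String) (out : List (String × List String)) : Decidable (Spec_group_by_strategy_py raw_lines out) := by unfold Spec_group_by_strategy_py; infer_instance

-- ===== CLAIM (what is proved, stated in full; the proofs are below) =====
def Claim_equal_group_by_strategy_py : Prop := ∀ (raw_lines : List String), Dom_group_by_strategy_py raw_lines → Spec_group_by_strategy_py raw_lines (group_by_strategy_py raw_lines)

-- ===== LEMMAS AND PROOFS =====

-- One step of A's loop on the three-bucket literal dict, per branch.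
theorem stepA_put (ln : String) (h1 : PySem.Str.isIn "| sell_put |" ln = true)
    (a b c : List String) :
    (if PySem.Str.isIn "| sell_put |" ln then
        (PySem.Dict.mk [("sell_put", a), ("sell_call", b), ("other", c)]).modify "sell_put" [] (· ++ [ln])
      else if PySem.Str.isIn "| sell_call |" ln then
        (PySem.Dict.mk [("sell_put", a), ("sell_call", b), ("other", c)]).modify "sell_call" [] (· ++ [ln])
      else (PySem.Dict.mk [("sell_put", a), ("sell_call", b), ("other", c)]).modify "other" [] (· ++ [ln]))
    = PySem.Dict.mk [("sell_put", a ++ [ln]), ("sell_call", b), ("other", c)] := by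
  rw [if_pos h1]
  simp [PySem.Dict.modify, PySem.Dict.contains, PySem.Dict.getD, PySem.Dict.get?, PySem.Dict.insert]

theorem stepA_call (ln : String) (h1 : PySem.Str.isIn "| sell_put |" ln = false)
    (h2 : PySem.Str.isIn "| sell_call |" ln = true) (a b c : List String) :
    (if PySem.Str.isIn "| sell_put |" ln then
        (PySem.Dict.mk [("sell_put", a), ("sell_call", b), ("other", c)]).modify "sell_put" [] (· ++ [ln])
      else if PySem.Str.isIn "| sell_call |" ln then
        (PySem.Dict.mk [("sell_put", a), ("sell_call", b), ("other", c)]).modify "sell_call" [] (· ++ [ln])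
      else (PySem.Dict.mk [("sell_put", a), ("sell_call", b), ("other", c)]).modify "other" [] (· ++ [ln]))
    = PySem.Dict.mk [("sell_put", a), ("sell_call", b ++ [ln]), ("other", c)] := by
  rw [if_neg (by simp only [h1, Bool.false_eq_true, not_false_eq_true]), if_pos h2]
  simp [PySem.Dict.modify, PySem.Dict.contains, PySem.Dict.getD, PySem.Dict.get?, PySem.Dict.insert]

theorem stepA_other (ln : String) (h1 : PySem.Str.isIn "| sell_put |" ln = false)
    (h2 : PySem.Str.isIn "| sell_call |" ln = false) (a b c : List String) :
    (if PySem.Str.isIn "| sell_put |" ln then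
        (PySem.Dict.mk [("sell_put", a), ("sell_call", b), ("other", c)]).modify "sell_put" [] (· ++ [ln])
      else if PySem.Str.isIn "| sell_call |" ln then
        (PySem.Dict.mk [("sell_put", a), ("sell_call", b), ("other", c)]).modify "sell_call" [] (· ++ [ln])
      else (PySem.Dict.mk [("sell_put", a), ("sell_call", b), ("other", c)]).modify "other" [] (· ++ [ln]))
    = PySem.Dict.mk [("sell_put", a), ("sell_call", b), ("other", c ++ [ln])] := by
  rw [if_neg (by simp only [h1, Bool.false_eq_true, not_false_eq_true]), if_neg (by simp only [h2, Bool.false_eq_true, not_false_eq_true])]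
  simp [PySem.Dict.modify, PySem.Dict.contains, PySem.Dict.getD, PySem.Dict.get?, PySem.Dict.insert]

-- Invariant of A's loop: folding over a three-bucket literal dict appends each
-- bucket's filtered lines to its accumulator.
theorem group_loop_inv (l : List String) (a b c : List String) :
    l.foldl (fun g ln =>
      if PySem.Str.isIn "| sell_put |" ln then g.modify "sell_put" [] (· ++ [ln])
      else if PySem.Str.isIn "| sell_call |" ln then g.modify "sell_call" [] (· ++ [ln])
      else g.modify "other" [] (· ++ [ln]))
      (PySem.Dict.mk [("sell_put", a), ("sell_call", b), ("other", c)])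
    = PySem.Dict.mk
        [("sell_put", a ++ l.filter (fun ln => PySem.Str.isIn "| sell_put |" ln)),
         ("sell_call", b ++ l.filter (fun ln =>
            PySem.Str.isIn "| sell_call |" ln && !PySem.Str.isIn "| sell_put |" ln)),
         ("other", c ++ l.filter (fun ln =>
            !PySem.Str.isIn "| sell_put |" ln && !PySem.Str.isIn "| sell_call |" ln))] := by
  induction l generalizing a b c with
  | nil => simp
  | cons x xs ih =>
    rw [List.foldl_cons]
    by_cases h1 : PySem.Str.isIn "| sell_put |" x
    · rw [stepA_put x h1, ih,
        List.filter_cons_of_pos h1,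
        List.filter_cons_of_neg (by simp only [h1, Bool.not_true, Bool.and_false, Bool.false_eq_true, not_false_eq_true]),
        List.filter_cons_of_neg (by simp only [h1, Bool.not_true, Bool.false_and, Bool.false_eq_true, not_false_eq_true])]
      simp only [List.append_assoc, List.singleton_append]
    · replace h1 : PySem.Str.isIn "| sell_put |" x = false := by simpa using h1
      by_cases h2 : PySem.Str.isIn "| sell_call |" x
      · rw [stepA_call x h1 h2, ih,
          List.filter_cons_of_neg (by simp only [h1, Bool.false_eq_true, not_false_eq_true]),
          List.filter_cons_of_pos (by simp only [h1, h2, Bool.not_false, Bool.and_true]),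
          List.filter_cons_of_neg (by simp only [h2, Bool.not_true, Bool.and_false, Bool.false_eq_true, not_false_eq_true])]
        simp only [List.append_assoc, List.singleton_append]
      · replace h2 : PySem.Str.isIn "| sell_call |" x = false := by simpa using h2
        rw [stepA_other x h1 h2, ih,
          List.filter_cons_of_neg (by simp only [h1, Bool.false_eq_true, not_false_eq_true]),
          List.filter_cons_of_neg (by simp only [h2, Bool.false_and, Bool.false_eq_true, not_false_eq_true]),
          List.filter_cons_of_pos (by simp only [h1, h2, Bool.not_false, Bool.and_true])]
        simp only [List.append_assoc, List.singleton_append]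

-- ===== VERDICT (by name: the statement is the Claim_ definition above) =====
theorem group_by_strategy_py_spec : Claim_equal_group_by_strategy_py := by
  intro raw_lines _
  unfold Spec_group_by_strategy_py group_by_strategy_py group_by_strategy_py_alt
  simp only [PySem.Dict.ofList]
  rw [show (PySem.Dict.empty.update [("sell_put", ([] : List String)), ("sell_call", []), ("other", [])])
      = PySem.Dict.mk [("sell_put", []), ("sell_call", []), ("other", [])] from rfl]
  rw [group_loop_inv]
  simp
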